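-- pv_equiv track=rewrite | github.com/Col-E/r8 | tools/r8_release.py | version_change_diff
-- ===== SOURCE A (Python) =====
-- def version_change_diff(diff, old_version, new_version):
--   invalid_line = None
--   for line in str(diff).splitlines():
--     if line.startswith('-  ') and \
--         line != '-  public static final String LABEL = "%s";' % old_version:
--       invalid_line = line
--     elif line.startswith('+  ') and \
--         line != '+  public static final String LABEL = "%s";' % new_version:
--       invalid_line = line
--   return invalid_line
-- ===== SOURCE B (Python) =====
-- def version_change_diff(diff, old_version, new_version):
--   lines = str(diff).splitlines()
--   old_label = '-  public static final String LABEL = "%s";' % old_version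
--   new_label = '+  public static final String LABEL = "%s";' % new_version
--   last_minus = max((i for i, line in enumerate(lines)
--                     if line.startswith('-  ') and line != old_label), default=-1)
--   last_plus = max((i for i, line in enumerate(lines)
--                    if line.startswith('+  ') and line != new_label), default=-1)
--   last = max(last_minus, last_plus)
--   return lines[last] if last >= 0 else None
-- ===== Notes on version B (the rewrite author's own statement) =====
-- stated objective: alternative
-- what changed: B runs two independent staged passes, one per diff prefix, each computing the maximal index of an invalid line via max over enumerate with default -1, then combines the two indices by max and indexes back into the line list, instead of A's single forward loop overwriting a line accumulator.
import Mathlib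
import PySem

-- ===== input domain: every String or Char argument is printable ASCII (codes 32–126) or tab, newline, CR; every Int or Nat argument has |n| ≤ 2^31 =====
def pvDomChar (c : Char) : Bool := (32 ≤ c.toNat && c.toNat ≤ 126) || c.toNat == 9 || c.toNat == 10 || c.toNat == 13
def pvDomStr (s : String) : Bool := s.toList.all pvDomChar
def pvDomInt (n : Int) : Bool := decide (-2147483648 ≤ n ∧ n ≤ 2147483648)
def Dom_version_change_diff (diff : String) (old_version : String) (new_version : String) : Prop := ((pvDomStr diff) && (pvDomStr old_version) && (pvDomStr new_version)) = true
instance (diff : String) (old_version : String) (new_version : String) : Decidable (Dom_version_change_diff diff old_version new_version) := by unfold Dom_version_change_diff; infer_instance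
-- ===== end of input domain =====

-- B replaces A's single forward accumulator loop by two staged per-prefix passes that each
-- compute the maximal invalid-line index (max over enumerate, default -1), combines the two
-- indices with max and indexes back into the line list (objective: alternative decomposition).

-- ===== PORT A =====
-- forward fold over splitlines, overwriting the accumulator on each invalid line (A's loop, step for step)
def version_change_diff (diff : String) (old_version : String) (new_version : String) : Option String :=
  (PySem.Str.splitlines diff).foldl
    (fun invalid_line line =>
      if PySem.Str.startswith line "-  " = true ∧
          line ≠ "-  public static final String LABEL = \"" ++ old_version ++ "\";" then
        some line
      else if PySem.Str.startswith line "+  " = true ∧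
          line ≠ "+  public static final String LABEL = \"" ++ new_version ++ "\";" then
        some line
      else invalid_line)
    none

-- ===== PORT B =====
def version_change_diff_alt (diff : String) (old_version : String) (new_version : String) : Option String :=
  let lines := PySem.Str.splitlines diff
  let old_label := "-  public static final String LABEL = \"" ++ old_version ++ "\";"
  let new_label := "+  public static final String LABEL = \"" ++ new_version ++ "\";"
  let last_minus := PySem.List.maxD
    (((PySem.List.enumerate lines).filter
        (fun il => PySem.Str.startswith il.2 "-  " && il.2 != old_label)).map (fun il => il.1))
    (fun x => x) (-1)
  let last_plus := PySem.List.maxD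
    (((PySem.List.enumerate lines).filter
        (fun il => PySem.Str.startswith il.2 "+  " && il.2 != new_label)).map (fun il => il.1))
    (fun x => x) (-1)
  let last := max last_minus last_plus
  if 0 ≤ last then PySem.List.pyGet? lines last else none

-- ===== PRECONDITION & SPEC =====
def Spec_version_change_diff (diff : String) (old_version : String) (new_version : String) (out : Option String) : Prop := out = version_change_diff_alt diff old_version new_version
instance (diff : String) (old_version : String) (new_version : String) (out : Option String) : Decidable (Spec_version_change_diff diff old_version new_version out) := by unfold Spec_version_change_diff; infer_instance

-- ===== CLAIM (what is proved, stated in full; the proofs are below) =====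
def Claim_equal_version_change_diff : Prop := ∀ (diff : String) (old_version : String) (new_version : String), Dom_version_change_diff diff old_version new_version → Spec_version_change_diff diff old_version new_version (version_change_diff diff old_version new_version)

-- ===== LEMMAS AND PROOFS =====

-- B's per-predicate staged pass: maximal index (default -1) of a line satisfying p.
def pvMx (p : String → Bool) (l : List String) : Int :=
  PySem.List.maxD
    (((PySem.List.enumerate l).filter (fun il => p il.2)).map (fun il => il.1))
    (fun x => x) (-1)

theorem pvMx_lt (p : String → Bool) (l : List String) : pvMx p l < (l.length : Int) := by
  unfold pvMx PySem.List.maxD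
  cases h : PySem.List.max?
      (((PySem.List.enumerate l).filter (fun il => p il.2)).map (fun il => il.1))
      (fun x => x) with
  | none => simp; omega
  | some m =>
      have hm := PySem.List.max?_mem h
      simp only [List.mem_map, List.mem_filter] at hm
      obtain ⟨il, ⟨hmem, _⟩, hfst⟩ := hm
      rw [PySem.List.mem_enumerate_iff] at hmem
      obtain ⟨k, hk, rfl⟩ := hmem
      simp only [Option.getD_some]
      omega

theorem pvMax?_append_singleton (xs : List Int) (n : Int) :
    PySem.List.max? (xs ++ [n]) (fun x => x) =
      some (match PySem.List.max? xs (fun x => x) with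
            | none => n
            | some m => if m < n then n else m) := by
  cases h : PySem.List.max? xs (fun x => x) with
  | none =>
      unfold PySem.List.max? at h ⊢
      rw [List.foldl_append, List.foldl_cons, List.foldl_nil, h]
  | some m =>
      unfold PySem.List.max? at h ⊢
      rw [List.foldl_append, List.foldl_cons, List.foldl_nil, h]
      simp only []
      split <;> rfl

theorem pvMx_append (p : String → Bool) (l : List String) (x : String) :
    pvMx p (l ++ [x]) = if p x then (l.length : Int) else pvMx p l := by
  unfold pvMx
  rw [show PySem.List.enumerate (l ++ [x]) = PySem.List.enumerate l ++ [((l.length : Int), x)] by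
        rw [PySem.List.enumerate_append]; simp [PySem.List.enumerate]]
  rw [List.filter_append, List.filter_singleton]
  by_cases hp : p x
  · simp only [hp, cond_true, List.map_append, List.map_cons, List.map_nil]
    unfold PySem.List.maxD
    rw [pvMax?_append_singleton]
    cases h : PySem.List.max?
        (((PySem.List.enumerate l).filter (fun il => p il.2)).map (fun il => il.1))
        (fun x => x) with
    | none => simp
    | some m =>
        have hm : m ∈ ((PySem.List.enumerate l).filter (fun il => p il.2)).map (fun il => il.1) :=
          PySem.List.max?_mem h
        simp only [List.mem_map, List.mem_filter] at hm
        obtain ⟨il, ⟨hmem, _⟩, hfst⟩ := hm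
        rw [PySem.List.mem_enumerate_iff] at hmem
        obtain ⟨k, hk, rfl⟩ := hmem
        have hlt : m < (l.length : Int) := by omega
        simp [hlt]
  · simp [hp]

theorem pvMx_or (p q : String → Bool) (l : List String) :
    max (pvMx p l) (pvMx q l) = pvMx (fun x => p x || q x) l := by
  induction l using List.reverseRecOn with
  | nil => rfl
  | append_singleton l x ih =>
      rw [pvMx_append, pvMx_append, pvMx_append, ← ih]
      have hp := pvMx_lt p l
      have hq := pvMx_lt q l
      cases hpx : p x <;> cases hqx : q x <;> simp <;> omega

theorem pvMx_find (q : String → Bool) (l : List String) :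
    (if 0 ≤ pvMx q l then PySem.List.pyGet? l (pvMx q l) else none) = l.reverse.find? q := by
  induction l using List.reverseRecOn with
  | nil => rfl
  | append_singleton l x ih =>
      rw [pvMx_append, List.reverse_append]
      simp only [List.reverse_singleton, List.singleton_append, List.find?]
      cases hqx : q x
      · simp only [Bool.false_eq_true, if_false]
        rw [← ih]
        by_cases h0 : 0 ≤ pvMx q l
        · have hlt := pvMx_lt q l
          rw [if_pos h0, if_pos h0,
              PySem.List.pyGet?_of_nonneg _ h0, PySem.List.pyGet?_of_nonneg _ h0,
              List.getElem?_append_left (by omega)]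
        · rw [if_neg h0, if_neg h0]
      · simp only [if_true]
        rw [if_pos (by positivity)]
        exact PySem.List.pyGet?_append_length _ _ _

-- A's fold with a "keep the last match" accumulator equals find? on the reversed list (with the start value as fallback).
theorem foldl_keep_last_eq_find?_reverse {α : Type} (p : α → Bool) (l : List α) (acc : Option α) :
    l.foldl (fun a x => if p x then some x else a) acc = (l.reverse.find? p).or acc := by
  induction l generalizing acc with
  | nil => simp
  | cons x l ih =>
      simp only [List.foldl_cons, List.reverse_cons, List.find?_append, ih]
      cases h : l.reverse.find? p with
      | some y => simp [Option.or]
      | none =>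
          simp only [Option.or, List.find?]
          cases hp : p x <;> simp

theorem version_change_diff_spec' (diff old_version new_version : String) :
    version_change_diff diff old_version new_version
      = version_change_diff_alt diff old_version new_version := by
  have hA : version_change_diff diff old_version new_version
      = (((PySem.Str.splitlines diff).reverse.find? (fun line =>
           ((fun line => PySem.Str.startswith line "-  " && line != ("-  public static final String LABEL = \"" ++ old_version ++ "\";")) line ||
            (fun line => PySem.Str.startswith line "+  " && line != ("+  public static final String LABEL = \"" ++ new_version ++ "\";")) line))).or none) := by
    unfold version_change_diff
    rw [show (fun (invalid_line : Option String) (line : String) =>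
        if PySem.Str.startswith line "-  " = true ∧
            line ≠ "-  public static final String LABEL = \"" ++ old_version ++ "\";" then
          some line
        else if PySem.Str.startswith line "+  " = true ∧
            line ≠ "+  public static final String LABEL = \"" ++ new_version ++ "\";" then
          some line
        else invalid_line)
      = (fun a line => if ((fun line => PySem.Str.startswith line "-  " && line != ("-  public static final String LABEL = \"" ++ old_version ++ "\";")) line ||
            (fun line => PySem.Str.startswith line "+  " && line != ("+  public static final String LABEL = \"" ++ new_version ++ "\";")) line) then some line else a)
      from by
        funext a x
        simp only [Bool.or_eq_true, Bool.and_eq_true, bne_iff_ne]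
        split_ifs <;> first | rfl | tauto]
    exact foldl_keep_last_eq_find?_reverse _ _ _
  have hB : version_change_diff_alt diff old_version new_version
      = (if 0 ≤ max
            (pvMx (fun line => PySem.Str.startswith line "-  " && line != ("-  public static final String LABEL = \"" ++ old_version ++ "\";")) (PySem.Str.splitlines diff))
            (pvMx (fun line => PySem.Str.startswith line "+  " && line != ("+  public static final String LABEL = \"" ++ new_version ++ "\";")) (PySem.Str.splitlines diff))
          then PySem.List.pyGet? (PySem.Str.splitlines diff)
            (max
              (pvMx (fun line => PySem.Str.startswith line "-  " && line != ("-  public static final String LABEL = \"" ++ old_version ++ "\";")) (PySem.Str.splitlines diff))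
              (pvMx (fun line => PySem.Str.startswith line "+  " && line != ("+  public static final String LABEL = \"" ++ new_version ++ "\";")) (PySem.Str.splitlines diff)))
          else none) := rfl
  rw [hA, hB, pvMx_or, pvMx_find]
  cases List.find? _ (PySem.Str.splitlines diff).reverse <;> simp [Option.or]

-- ===== VERDICT (by name: the statement is the Claim_ definition above) =====
theorem version_change_diff_spec : Claim_equal_version_change_diff := by
  intro diff o n _
  exact version_change_diff_spec' diff o n
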